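-- pv_equiv track=rewrite | github.com/blegloannec/cryptopals | 3/3.23.py | opr
-- ===== SOURCE A (Python) =====
-- def get_bit(x,i):
--     return (x>>i)&1 if 0<=i<32 else 0
--
-- def opr(y,a,b):
--     z = 0
--     for i in range(32):
--         if get_bit(b,i):
--             z |= (get_bit(y,i)^get_bit(y,i+a))<<i
--         else:
--             z |= get_bit(y,i)<<i
--     return z
-- ===== SOURCE B (Python) =====
-- def opr(y, a, b):
--     M = 0xFFFFFFFF
--     y32 = y & M
--     if a >= 32 or a <= -32:
--         s = 0
--     elif a >= 0:
--         s = y32 >> a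
--     else:
--         s = (y32 << -a) & M
--     return (y32 ^ (s & (b & M))) & M
-- ===== Notes on version B (the rewrite author's own statement) =====
-- stated objective: simpler
-- what changed: A's 32-iteration per-bit loop (extract, xor, re-assemble each bit) is replaced by a closed-form bitwise expression: mask y and b to 32 bits, compute the whole shifted word y32>>a (or (y32<<-a)&M for negative a, 0 when |a|>=32) once, and return (y32 ^ (shift & b32)) & M.
import Mathlib
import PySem

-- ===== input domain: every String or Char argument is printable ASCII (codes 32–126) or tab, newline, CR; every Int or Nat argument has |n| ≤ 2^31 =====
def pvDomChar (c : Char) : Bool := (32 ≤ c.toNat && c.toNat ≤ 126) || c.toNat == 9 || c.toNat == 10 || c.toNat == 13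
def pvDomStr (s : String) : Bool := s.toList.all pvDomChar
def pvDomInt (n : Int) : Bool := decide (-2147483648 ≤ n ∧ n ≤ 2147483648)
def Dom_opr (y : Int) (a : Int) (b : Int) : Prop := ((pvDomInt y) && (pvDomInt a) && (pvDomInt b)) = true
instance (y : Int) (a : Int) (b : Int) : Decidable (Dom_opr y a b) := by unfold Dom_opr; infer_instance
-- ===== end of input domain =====

-- B replaces A's 32-iteration bit loop by a closed-form bitwise expression (mask, one shift, xor); objective: simpler.

-- ===== PORT A =====
def get_bit (x : Int) (i : Int) : Int :=
  if 0 ≤ i ∧ i < 32 then PySem.Int.band (x >>> i.toNat) 1 else 0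

def opr (y : Int) (a : Int) (b : Int) : Int :=
  (PySem.List.pyRange 0 32 1).foldl
    (fun z i =>
      if get_bit b i ≠ 0 then
        PySem.Int.bor z (PySem.Int.bxor (get_bit y i) (get_bit y (i + a)) <<< i.toNat)
      else
        PySem.Int.bor z (get_bit y i <<< i.toNat)) 0

-- ===== PORT B =====
def opr_alt (y : Int) (a : Int) (b : Int) : Int :=
  let M : Int := 4294967295
  let y32 : Int := PySem.Int.band y M
  let s : Int :=
    if 32 ≤ a ∨ a ≤ -32 then 0
    else if 0 ≤ a then y32 >>> a.toNat
    else PySem.Int.band (y32 <<< (-a).toNat) M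
  PySem.Int.band (PySem.Int.bxor y32 (PySem.Int.band s (PySem.Int.band b M))) M

-- ===== PRECONDITION & SPEC =====
def Spec_opr (y : Int) (a : Int) (b : Int) (out : Int) : Prop := out = opr_alt y a b
instance (y : Int) (a : Int) (b : Int) (out : Int) : Decidable (Spec_opr y a b out) := by unfold Spec_opr; infer_instance

-- ===== CLAIM (what is proved, stated in full; the proofs are below) =====
def Claim_equal_opr : Prop := ∀ (y : Int) (a : Int) (b : Int), Dom_opr y a b → Spec_opr y a b (opr y a b)

-- ===== LEMMAS AND PROOFS =====

-- bit j of (x mod 2^32)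
def pvBit (x : Int) (j : Nat) : Bool := ((x % 4294967296).toNat).testBit j

-- the per-bit value of A's loop at bit j
def pvF (y a b : Int) (j : Nat) : Bool :=
  xor (pvBit y j)
    ((pvBit b j) && (if 0 ≤ (j : Int) + a ∧ (j : Int) + a < 32 then pvBit y ((j : Int) + a).toNat else false))

-- Nat-level accumulator step mirroring A's loop
def pvStep (y a b : Int) (n : Nat) (j : Nat) : Nat :=
  n ||| ((if pvF y a b j then 1 else 0) <<< j)

-- Nat-level value of B's shift
def pvS (y a : Int) : Nat :=
  if 32 ≤ a ∨ a ≤ -32 then 0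
  else if 0 ≤ a then ((y % 4294967296).toNat) >>> a.toNat
  else (((y % 4294967296).toNat) <<< (-a).toNat) % 4294967296

theorem L_mask (x : Int) : PySem.Int.band x 4294967295 = x % 4294967296 := by
  have hM : ((4294967295 : Int)).toNat = 2 ^ 32 - 1 := by decide
  have hMpos : (0 : Int) ≤ 4294967295 := by norm_num
  have h32 : (2 : Nat) ^ 32 = 4294967296 := by norm_num
  by_cases hx : 0 ≤ x
  · unfold PySem.Int.band
    rw [if_pos hx, if_pos hMpos, hM, Nat.and_two_pow_sub_one_eq_mod, h32]
    omega
  · unfold PySem.Int.band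
    rw [if_neg hx, if_pos hMpos, hM, Nat.and_comm, Nat.and_two_pow_sub_one_eq_mod, h32]
    omega

theorem L_gb (x : Int) (j : Nat) (hj : j < 32) :
    get_bit x (j : Int) = if pvBit x j then 1 else 0 := by
  have hc : (0 : Int) ≤ (j : Int) ∧ (j : Int) < 32 := ⟨by positivity, by exact_mod_cast hj⟩
  unfold get_bit
  rw [if_pos hc, Int.toNat_natCast, PySem.Int.band_one]
  unfold PySem.Int.mod
  rw [Int.fmod_eq_emod, if_pos (Or.inl (by norm_num : (0:Int) ≤ 2)), add_zero,
    Int.shiftRight_eq_div_pow]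
  have hq0 : (4294967296 : Int) * (x / 4294967296) + x % 4294967296 = x :=
    Int.mul_ediv_add_emod x 4294967296
  have h2 : (2 : Int) ^ j * (2 * 2 ^ (31 - j)) = 4294967296 := by
    rw [show (2:Int) * 2 ^ (31 - j) = 2 ^ (32 - j) by
          rw [← pow_succ']; congr 1; omega,
        ← pow_add]
    rw [show j + (32 - j) = 32 by omega]
    norm_num
  have hq : x = x % 4294967296 + (2 : Int) ^ j * ((2 * 2 ^ (31 - j)) * (x / 4294967296)) := by
    rw [← mul_assoc, h2]; linarith
  have hdiv : x / ((2 ^ j : Nat) : Int) % 2 = (x % 4294967296) / ((2:Int) ^ j) % 2 := by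
    rw [show ((2 ^ j : Nat) : Int) = (2:Int) ^ j by push_cast; ring]
    conv_lhs => rw [hq]
    rw [Int.add_mul_ediv_left _ _ (by positivity : ((2:Int) ^ j) ≠ 0),
      show (2:Int) * 2 ^ (31 - j) * (x / 4294967296)
          = 2 * (2 ^ (31 - j) * (x / 4294967296)) by ring,
      Int.add_mul_emod_self_left]
  rw [hdiv]
  have hr0 : 0 ≤ x % 4294967296 := Int.emod_nonneg x (by norm_num)
  have hrm : x % 4294967296 = ((x % 4294967296).toNat : Int) := (Int.toNat_of_nonneg hr0).symm
  unfold pvBit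
  rw [hrm, Int.toNat_natCast,
    show ((2:Int) ^ j) = ((2 ^ j : Nat) : Int) by push_cast; ring,
    ← Int.natCast_div, Nat.testBit_eq_decide_div_mod_eq]
  generalize (x % 4294967296).toNat / 2 ^ j = d
  rcases Nat.mod_two_eq_zero_or_one d with h | h <;> simp [h] <;> omega

theorem L_gb2 (x i : Int) :
    get_bit x i = if 0 ≤ i ∧ i < 32 then (if pvBit x i.toNat then 1 else 0) else 0 := by
  by_cases h : 0 ≤ i ∧ i < 32
  · rw [if_pos h]
    have h2 : i = ((i.toNat : Nat) : Int) := (Int.toNat_of_nonneg h.1).symm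
    conv_lhs => rw [h2]
    rw [L_gb x i.toNat (by omega)]
  · unfold get_bit
    rw [if_neg h, if_neg h]

def aStep (y a b : Int) (z i : Int) : Int :=
  if get_bit b i ≠ 0 then
    PySem.Int.bor z (PySem.Int.bxor (get_bit y i) (get_bit y (i + a)) <<< i.toNat)
  else
    PySem.Int.bor z (get_bit y i <<< i.toNat)

theorem pv_bxor01 (p q : Bool) :
    PySem.Int.bxor (if p then 1 else 0) (if q then 1 else 0) = if xor p q then 1 else 0 := by
  cases p <;> cases q <;> decide

theorem pv_borShift (n j : Nat) (p : Bool) :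
    PySem.Int.bor (n : Int) ((if p then (1 : Int) else 0) <<< j)
      = ((n ||| ((if p then 1 else 0) <<< j) : Nat) : Int) := by
  cases p
  · show PySem.Int.bor (n : Int) ((0 : Int) <<< j) = ((n ||| ((0 : Nat) <<< j) : Nat) : Int)
    rw [show (0 : Int) = ((0 : Nat) : Int) by norm_num, ← Int.natCast_shiftLeft,
      PySem.Int.bor_natCast]
  · show PySem.Int.bor (n : Int) ((1 : Int) <<< j) = ((n ||| ((1 : Nat) <<< j) : Nat) : Int)
    rw [show (1 : Int) = ((1 : Nat) : Int) by norm_num, ← Int.natCast_shiftLeft,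
      PySem.Int.bor_natCast]

theorem pv_ifpair (c : Prop) [Decidable c] (p : Bool) :
    (if c then (if p then (1:Int) else 0) else 0) = if (if c then p else false) then 1 else 0 := by
  split_ifs <;> simp_all

theorem step_eq (y a b : Int) (n j : Nat) (hj : j < 32) :
    aStep y a b ((n : Nat) : Int) ((j : Nat) : Int) = ((pvStep y a b n j : Nat) : Int) := by
  unfold aStep
  rw [Int.toNat_natCast, L_gb b j hj, L_gb y j hj, L_gb2 y ((j:Int) + a), pv_ifpair]
  unfold pvStep pvF
  cases hb : pvBit b j
  · simp only [Bool.false_and, Bool.xor_false]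
    rw [if_neg (by norm_num), pv_borShift]
  · simp only [Bool.true_and]
    rw [if_pos (by norm_num), pv_bxor01, pv_borShift]

theorem A_char (y a b : Int) :
    opr y a b = (((List.range 32).foldl (pvStep y a b) 0 : Nat) : Int) := by
  have hopr : opr y a b = (PySem.List.pyRange 0 32 1).foldl (aStep y a b) 0 := rfl
  rw [hopr,
    show PySem.List.pyRange 0 32 1 = (List.range 32).map (fun j => (j : Int)) from by decide,
    List.foldl_map]
  suffices h : ∀ (L : List Nat) (n : Nat), (∀ j ∈ L, j < 32) →
      (L.foldl (fun z j => aStep y a b z ((j : Nat) : Int)) ((n : Nat) : Int))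
        = ((L.foldl (pvStep y a b) n : Nat) : Int) by
    exact h (List.range 32) 0 (fun j hj => List.mem_range.mp hj)
  intro L
  induction L with
  | nil => intro n _; simp
  | cons j L ih =>
    intro n hmem
    simp only [List.foldl_cons]
    rw [step_eq y a b n j (hmem j (by simp))]
    exact ih (pvStep y a b n j) (fun m hm => hmem m (by simp [hm]))

theorem pv_bitShift (p : Bool) (j k : Nat) :
    (((if p then 1 else 0) <<< j : Nat)).testBit k = (decide (k = j) && p) := by
  cases p
  · simp [Nat.zero_shiftLeft, Nat.zero_testBit]
  · rw [if_pos rfl, Nat.shiftLeft_eq, one_mul, Nat.testBit_two_pow]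
    simp [eq_comm]

theorem foldN (y a b : Int) (L : List Nat) (n : Nat) (k : Nat) :
    ((L.foldl (pvStep y a b) n).testBit k) = (n.testBit k || (decide (k ∈ L) && pvF y a b k)) := by
  induction L generalizing n with
  | nil => simp
  | cons j L ih =>
    simp only [List.foldl_cons, ih]
    unfold pvStep
    rw [Nat.testBit_lor, pv_bitShift]
    simp only [List.mem_cons]
    by_cases hkj : k = j
    · subst hkj
      cases hF : pvF y a b k <;> cases hmem : decide (k ∈ L) <;> simp
    · simp [hkj]

theorem pv_castmod (m : Nat) : ((m : Int)) % 4294967296 = ((m % 4294967296 : Nat) : Int) := by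
  omega

theorem B_char (y a b : Int) :
    opr_alt y a b
      = (((((y % 4294967296).toNat) ^^^ (pvS y a &&& ((b % 4294967296).toNat))) % 4294967296 : Nat) : Int) := by
  have hy0 : 0 ≤ y % 4294967296 := Int.emod_nonneg y (by norm_num)
  have hb0 : 0 ≤ b % 4294967296 := Int.emod_nonneg b (by norm_num)
  have hY : y % 4294967296 = (((y % 4294967296).toNat : Nat) : Int) := (Int.toNat_of_nonneg hy0).symm
  have hB : b % 4294967296 = (((b % 4294967296).toNat : Nat) : Int) := (Int.toNat_of_nonneg hb0).symm
  simp only [opr_alt, pvS, L_mask]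
  rw [hY, hB]
  simp only [Int.toNat_natCast]
  split_ifs with h1 h2
  · rw [show (0 : Int) = ((0 : Nat) : Int) by norm_num, PySem.Int.band_natCast,
      PySem.Int.bxor_natCast]
    exact pv_castmod _
  · rw [← Int.natCast_shiftRight, PySem.Int.band_natCast, PySem.Int.bxor_natCast]
    exact pv_castmod _
  · rw [← Int.natCast_shiftLeft, pv_castmod, PySem.Int.band_natCast, PySem.Int.bxor_natCast]
    exact pv_castmod _

theorem S_bit (y a : Int) (k : Nat) (hk : k < 32) :
    (pvS y a).testBit k
      = (if 0 ≤ (k : Int) + a ∧ (k : Int) + a < 32 then pvBit y ((k : Int) + a).toNat else false) := by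
  have hYlt : (y % 4294967296).toNat < 2 ^ 32 := by
    have := Int.emod_lt_of_pos y (show (0:Int) < 4294967296 by norm_num)
    omega
  unfold pvS pvBit
  by_cases h1 : 32 ≤ a ∨ a ≤ -32
  · rw [if_pos h1, if_neg (by omega), Nat.zero_testBit]
  · rw [if_neg h1]
    by_cases h2 : 0 ≤ a
    · rw [if_pos h2, Nat.testBit_shiftRight]
      by_cases h3 : (k : Int) + a < 32
      · rw [if_pos ⟨by omega, h3⟩]
        congr 1
        omega
      · rw [if_neg (by omega)]
        exact Nat.testBit_lt_two_pow
          (lt_of_lt_of_le hYlt (Nat.pow_le_pow_right (by norm_num) (by omega)))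
    · rw [if_neg h2, show (4294967296 : Nat) = 2 ^ 32 by norm_num,
        Nat.testBit_mod_two_pow, Nat.testBit_shiftLeft]
      simp only [hk, decide_true, Bool.true_and, ge_iff_le]
      by_cases h3 : (-a).toNat ≤ k
      · rw [if_pos (by omega)]
        simp only [h3, decide_true, Bool.true_and]
        congr 1
        omega
      · rw [if_neg (by omega)]
        simp [h3]

theorem main_eq (y a b : Int) : opr y a b = opr_alt y a b := by
  rw [A_char, B_char]
  congr 1
  apply Nat.eq_of_testBit_eq
  intro k
  rw [foldN]
  by_cases hk : k < 32
  · simp only [Nat.zero_testBit, Bool.false_or, List.mem_range, hk, decide_true, Bool.true_and]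
    have h32 : (4294967296 : Nat) = 2 ^ 32 := by norm_num
    rw [h32, Nat.testBit_mod_two_pow, Nat.testBit_xor, Nat.testBit_land, S_bit y a k hk]
    simp only [hk, decide_true, Bool.true_and]
    unfold pvF pvBit
    cases h1 : ((y % 4294967296).toNat).testBit k <;>
      cases h2 : ((b % 4294967296).toNat).testBit k <;>
        cases h3 : (if 0 ≤ (k : Int) + a ∧ (k : Int) + a < 32 then ((y % 4294967296).toNat).testBit ((k : Int) + a).toNat else false) <;>
          simp
  · have h32 : (4294967296 : Nat) = 2 ^ 32 := by norm_num
    rw [h32, Nat.testBit_mod_two_pow]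
    simp [hk]

-- ===== VERDICT (by name: the statement is the Claim_ definition above) =====
theorem opr_spec : Claim_equal_opr := by
  intro y a b _
  unfold Spec_opr
  exact main_eq y a b
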